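-- pv_equiv track=rewrite | github.com/OldNew777/hecate-python | video_parser.py | sbd_heuristic
-- ===== SOURCE A (Python) =====
-- def sbd_heuristic(v_diff, njumps, min_shot_len):
--     jump = []
--     sorted_v_idx = [i for i in range(len(v_diff))]
--     sorted_v_idx = sorted(sorted_v_idx, key=lambda id: v_diff[id])
--     sorted_v_diff = sorted(v_diff)
--     for i in range(len(sorted_v_diff) - 1, -1, -1):
--         add = True
--         if sorted_v_idx[i] + 1 < min_shot_len or len(v_diff) - sorted_v_idx[i] < min_shot_len:
--             add = False
--         else:
--             for j in range(len(jump)):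
--                 length = abs(jump[j] - sorted_v_idx[i]) + 1
--                 if length < min_shot_len:
--                     add = False
--                     break
--         if add:
--             jump.append(sorted_v_idx[i])
--         if len(jump) == njumps:
--             break
--     return jump
-- ===== SOURCE B (Python) =====
-- def sbd_heuristic(v_diff, njumps, min_shot_len):
--     # Same greedy selection of high-difference frames, but the per-candidate
--     # scan over all accepted jumps is replaced by a boolean "blocked" array:
--     # accepting a jump marks its forbidden window once, so each candidate is
--     # checked in O(1).
--     n = len(v_diff)
--     order = sorted(range(n), key=lambda i: v_diff[i])
--     blocked = [False] * n
--     jump = []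
--     for idx in reversed(order):
--         if idx + 1 >= min_shot_len and n - idx >= min_shot_len and not blocked[idx]:
--             jump.append(idx)
--             for t in range(max(0, idx - (min_shot_len - 2)), min(n, idx + min_shot_len - 1)):
--                 blocked[t] = True
--         if len(jump) == njumps:
--             break
--     return jump
-- ===== Notes on version B (the rewrite author's own statement) =====
-- stated objective: faster
-- what changed: The per-candidate linear scan over all accepted jumps is replaced by a boolean blocked array: accepting a jump marks its forbidden window once, so each candidate is rejected or accepted with one array lookup.
import Mathlib
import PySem

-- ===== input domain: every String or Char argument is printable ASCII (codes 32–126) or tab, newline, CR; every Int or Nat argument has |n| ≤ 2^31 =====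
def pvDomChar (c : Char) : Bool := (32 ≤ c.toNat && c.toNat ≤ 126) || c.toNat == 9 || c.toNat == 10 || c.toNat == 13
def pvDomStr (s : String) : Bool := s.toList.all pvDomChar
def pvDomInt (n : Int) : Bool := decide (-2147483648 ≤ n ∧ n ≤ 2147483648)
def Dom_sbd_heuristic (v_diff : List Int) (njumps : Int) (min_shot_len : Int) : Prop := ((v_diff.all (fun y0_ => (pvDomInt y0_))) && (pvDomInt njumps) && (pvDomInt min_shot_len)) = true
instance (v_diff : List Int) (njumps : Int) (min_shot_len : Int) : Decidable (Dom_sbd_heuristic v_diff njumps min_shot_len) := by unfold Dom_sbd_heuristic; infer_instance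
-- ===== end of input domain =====

-- B replaces A's per-candidate scan over all accepted jumps by a boolean blocked
-- array marked once per accepted jump (objective: faster per-candidate check).

-- ===== PORT A =====
-- inner loop "for j in range(len(jump)): length = abs(jump[j] - idx) + 1; if length < min_shot_len: add = False; break"
-- (abs x is ported as the cast of x.natAbs, which is exactly Python's abs on ints)
def pvScanA (idx min_shot_len : Int) : List Int → Bool
  | [] => true
  | j :: rest =>
    if ((j - idx).natAbs : Int) + 1 < min_shot_len then false
    else pvScanA idx min_shot_len rest

-- outer loop "for i in range(len(sorted_v_diff)-1, -1, -1)" reading sorted_v_idx[i]: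
-- len(sorted_v_diff) = len(sorted_v_idx), and the loop reads sorted_v_idx at every index
-- from last to first, i.e. it walks sorted_v_idx.reverse; ported as structural recursion on that list.
def pvLoopA (nv njumps min_shot_len : Int) : List Int → List Int → List Int
  | [], jump => jump
  | idx :: rest, jump =>
    let add := if idx + 1 < min_shot_len || nv - idx < min_shot_len then false
               else pvScanA idx min_shot_len jump
    let jump' := if add then jump ++ [idx] else jump
    if (jump'.length : Int) = njumps then jump'
    else pvLoopA nv njumps min_shot_len rest jump'

def sbd_heuristic (v_diff : List Int) (njumps : Int) (min_shot_len : Int) : List Int :=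
  -- sorted_v_idx = sorted(range(len(v_diff)), key=lambda id: v_diff[id]); indices are always
  -- in range, so v_diff[id] is pyGetD with an (unreachable) default.
  let sorted_v_idx := PySem.List.sorted (PySem.List.pyRange 0 (v_diff.length : Int) 1)
      (fun id => PySem.List.pyGetD v_diff id 0)
  -- sorted_v_diff = sorted(v_diff) is computed by A but only its length (= len(v_diff)) is used
  pvLoopA (v_diff.length : Int) njumps min_shot_len sorted_v_idx.reverse []

-- ===== PORT B =====
-- loop of Source B: blocked is a list of booleans; accepting idx marks
-- range(max(0, idx-(min_shot_len-2)), min(n, idx+min_shot_len-1)); all marked/read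
-- indices are in [0, n), so list indexing is exact via .toNat / getD.
def pvLoopB (n njumps min_shot_len : Int) : List Int → List Int → List Bool → List Int
  | [], jump, _ => jump
  | idx :: rest, jump, blocked =>
    if idx + 1 ≥ min_shot_len && n - idx ≥ min_shot_len && !(blocked.getD idx.toNat false) then
      let jump' := jump ++ [idx]
      let blocked' := (PySem.List.pyRange (max 0 (idx - (min_shot_len - 2)))
          (min n (idx + min_shot_len - 1)) 1).foldl (fun b t => b.set t.toNat true) blocked
      if (jump'.length : Int) = njumps then jump'
      else pvLoopB n njumps min_shot_len rest jump' blocked'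
    else
      if (jump.length : Int) = njumps then jump
      else pvLoopB n njumps min_shot_len rest jump blocked

def sbd_heuristic_alt (v_diff : List Int) (njumps : Int) (min_shot_len : Int) : List Int :=
  let order := PySem.List.sorted (PySem.List.pyRange 0 (v_diff.length : Int) 1)
      (fun id => PySem.List.pyGetD v_diff id 0)
  pvLoopB (v_diff.length : Int) njumps min_shot_len order.reverse []
      (List.replicate v_diff.length false)

-- ===== PRECONDITION & SPEC =====
def Spec_sbd_heuristic (v_diff : List Int) (njumps : Int) (min_shot_len : Int) (out : List Int) : Prop := out = sbd_heuristic_alt v_diff njumps min_shot_len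
instance (v_diff : List Int) (njumps : Int) (min_shot_len : Int) (out : List Int) : Decidable (Spec_sbd_heuristic v_diff njumps min_shot_len out) := by unfold Spec_sbd_heuristic; infer_instance

-- ===== CLAIM (what is proved, stated in full; the proofs are below) =====
def Claim_equal_sbd_heuristic : Prop := ∀ (v_diff : List Int) (njumps : Int) (min_shot_len : Int), Dom_sbd_heuristic v_diff njumps min_shot_len → Spec_sbd_heuristic v_diff njumps min_shot_len (sbd_heuristic v_diff njumps min_shot_len)

-- ===== LEMMAS AND PROOFS =====

-- A's inner scan decides "no accepted jump is closer than min_shot_len-1".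
lemma pvScanA_eq_decide (idx msl : Int) (jump : List Int) :
    pvScanA idx msl jump = ! decide (∃ j ∈ jump, ((j - idx).natAbs : Int) + 1 < msl) := by
  induction jump with
  | nil => simp [pvScanA]
  | cons j rest ih =>
    by_cases h : ((j - idx).natAbs : Int) + 1 < msl
    · rw [pvScanA, if_pos h, decide_eq_true ⟨j, by simp, h⟩]
      rfl
    · rw [pvScanA, if_neg h, ih]
      have hiff : (∃ a ∈ j :: rest, ((a - idx).natAbs : Int) + 1 < msl)
          ↔ ∃ a ∈ rest, ((a - idx).natAbs : Int) + 1 < msl := by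
        simp only [List.mem_cons]
        constructor
        · rintro ⟨a, rfl | ha, hl⟩
          · exact absurd hl h
          · exact ⟨a, ha, hl⟩
        · rintro ⟨a, ha, hl⟩
          exact ⟨a, Or.inr ha, hl⟩
      rw [decide_eq_decide.mpr hiff]

lemma mark_length (ts : List Int) (blocked : List Bool) :
    (ts.foldl (fun b t => b.set t.toNat true) blocked).length = blocked.length := by
  induction ts generalizing blocked with
  | nil => rfl
  | cons t rest ih => simp [List.foldl, ih]

lemma getD_set_bool (b : List Bool) (k i : Nat) :
    (b.set k true).getD i false = if i = k ∧ k < b.length then true else b.getD i false := by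
  by_cases h : i = k ∧ k < b.length
  · obtain ⟨rfl, hk⟩ := h
    simp [List.getD_eq_getElem?_getD, hk]
  · rw [if_neg h]
    by_cases he : i = k
    · subst he
      have hnk : ¬ i < b.length := fun hlt => h ⟨rfl, hlt⟩
      simp [List.getD_eq_getElem?_getD, hnk]
    · simp [List.getD_eq_getElem?_getD, Ne.symm he]

-- folding set over a list of in-range indices marks exactly those positions
lemma mark_getD_list (ts : List Int) (blocked : List Bool)
    (hts : ∀ t ∈ ts, 0 ≤ t ∧ t < (blocked.length : Int)) (i : Nat) :
    (ts.foldl (fun b t => b.set t.toNat true) blocked).getD i false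
      = (blocked.getD i false || decide ((i : Int) ∈ ts)) := by
  induction ts generalizing blocked with
  | nil => simp
  | cons t rest ih =>
    obtain ⟨ht0, htn⟩ := hts t (by simp)
    simp only [List.foldl_cons]
    rw [ih (blocked.set t.toNat true)
        (fun u hu => by simpa using hts u (by simp [hu])), getD_set_bool]
    by_cases hit : (i : Int) = t
    · have h1 : i = t.toNat := by omega
      have h2 : t.toNat < blocked.length := by omega
      rw [if_pos ⟨h1, h2⟩]
      simp [List.mem_cons, hit]
    · have : ¬ (i = t.toNat ∧ t.toNat < blocked.length) := by
        rintro ⟨rfl, _⟩; omega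
      rw [if_neg this]
      have : ((i : Int) ∈ t :: rest) ↔ ((i : Int) ∈ rest) := by
        simp [List.mem_cons, hit]
      simp [this]

-- main loop correspondence: blocked[i] ⟺ some accepted jump is within min_shot_len-2 of i
lemma pvLoop_eq (n : Nat) (njumps msl : Int) (cands : List Int) (jump : List Int)
    (blocked : List Bool) (hlen : blocked.length = n)
    (hc : ∀ c ∈ cands, 0 ≤ c ∧ c < (n : Int))
    (hinv : ∀ i : Nat, i < n →
      blocked.getD i false = decide (∃ j ∈ jump, ((j - (i : Int)).natAbs : Int) + 1 < msl)) :
    pvLoopA (n : Int) njumps msl cands jump = pvLoopB (n : Int) njumps msl cands jump blocked := by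
  induction cands generalizing jump blocked with
  | nil => rfl
  | cons idx rest ih =>
    obtain ⟨hidx0, hidxn⟩ := hc idx (by simp)
    have hrest : ∀ c ∈ rest, 0 ≤ c ∧ c < (n : Int) := fun c hcm => hc c (by simp [hcm])
    have hidxnat : idx.toNat < n := by omega
    have hread : blocked.getD idx.toNat false
        = decide (∃ j ∈ jump, ((j - idx).natAbs : Int) + 1 < msl) := by
      have hcast : ((idx.toNat : Nat) : Int) = idx := by omega
      rw [hinv idx.toNat hidxnat, hcast]
    by_cases hb : idx + 1 < msl ∨ (n : Int) - idx < msl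
    · -- boundary rejection in both
      have hA : (idx + 1 < msl || (n : Int) - idx < msl) = true := by
        simp only [Bool.or_eq_true, decide_eq_true_eq]; exact hb
      have hB : (idx + 1 ≥ msl && (n : Int) - idx ≥ msl && !(blocked.getD idx.toNat false)) = false := by
        rcases hb with h | h <;> simp <;> omega
      have hsa : pvLoopA (n : Int) njumps msl (idx :: rest) jump
          = if ((jump.length : Int) = njumps) then jump
            else pvLoopA (n : Int) njumps msl rest jump := by
        simp [pvLoopA, hA]
      have hsb : pvLoopB (n : Int) njumps msl (idx :: rest) jump blocked
          = if ((jump.length : Int) = njumps) then jump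
            else pvLoopB (n : Int) njumps msl rest jump blocked := by
        rw [pvLoopB, hB]
        simp
      rw [hsa, hsb]
      split_ifs with hstop
      · rfl
      · exact ih jump blocked hlen hrest hinv
    · obtain ⟨hb1, hb2⟩ := not_or.mp hb
      have hA : (idx + 1 < msl || (n : Int) - idx < msl) = false := by
        simp only [Bool.or_eq_false_iff, decide_eq_false_iff_not]; omega
      by_cases hblk : ∃ j ∈ jump, ((j - idx).natAbs : Int) + 1 < msl
      · -- idx too close to an accepted jump: both reject
        have hscan : pvScanA idx msl jump = false := by
          rw [pvScanA_eq_decide, decide_eq_true hblk]; rfl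
        have hB : (idx + 1 ≥ msl && (n : Int) - idx ≥ msl && !(blocked.getD idx.toNat false)) = false := by
          rw [hread, decide_eq_true hblk]; simp
        have hsa : pvLoopA (n : Int) njumps msl (idx :: rest) jump
            = if ((jump.length : Int) = njumps) then jump
              else pvLoopA (n : Int) njumps msl rest jump := by
          simp [pvLoopA, hA, hscan]
        have hsb : pvLoopB (n : Int) njumps msl (idx :: rest) jump blocked
            = if ((jump.length : Int) = njumps) then jump
              else pvLoopB (n : Int) njumps msl rest jump blocked := by
          rw [pvLoopB, hB]
          simp
        rw [hsa, hsb]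
        split_ifs with hstop
        · rfl
        · exact ih jump blocked hlen hrest hinv
      · -- accepted by both
        have hscan : pvScanA idx msl jump = true := by
          rw [pvScanA_eq_decide, decide_eq_false hblk]; rfl
        have hB : (idx + 1 ≥ msl && (n : Int) - idx ≥ msl && !(blocked.getD idx.toNat false)) = true := by
          rw [hread, decide_eq_false hblk]
          simp only [Bool.not_false, Bool.and_true, Bool.and_eq_true, decide_eq_true_eq]
          exact ⟨by omega, by omega⟩
        have hsa : pvLoopA (n : Int) njumps msl (idx :: rest) jump
            = if (((jump ++ [idx]).length : Int) = njumps) then jump ++ [idx]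
              else pvLoopA (n : Int) njumps msl rest (jump ++ [idx]) := by
          simp [pvLoopA, hA, hscan]
        have hsb : pvLoopB (n : Int) njumps msl (idx :: rest) jump blocked
            = if (((jump ++ [idx]).length : Int) = njumps) then jump ++ [idx]
              else pvLoopB (n : Int) njumps msl rest (jump ++ [idx])
                ((PySem.List.pyRange (max 0 (idx - (msl - 2)))
                  (min (n : Int) (idx + msl - 1)) 1).foldl
                  (fun b t => b.set t.toNat true) blocked) := by
          rw [pvLoopB, hB]
          simp
        rw [hsa, hsb]
        split_ifs with hstop
        · rfl
        · apply ih
          · rw [mark_length, hlen]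
          · exact hrest
          · intro i hi'
            rw [mark_getD_list _ blocked
                (fun t ht => by rw [PySem.List.mem_pyRange_one] at ht; constructor <;> omega) i,
              hinv i hi']
            rw [show (decide ((i : Int) ∈ PySem.List.pyRange (max 0 (idx - (msl - 2)))
                    (min (n : Int) (idx + msl - 1)) 1))
                  = decide (max 0 (idx - (msl - 2)) ≤ (i : Int) ∧
                      (i : Int) < min (n : Int) (idx + msl - 1)) from by
                simp [PySem.List.mem_pyRange_one]]
            rw [← Bool.decide_or, decide_eq_decide]
            simp only [List.mem_append, List.mem_singleton]
            constructor
            · rintro (⟨j, hj, hlt⟩ | ⟨h1, h2⟩)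
              · exact ⟨j, Or.inl hj, hlt⟩
              · exact ⟨idx, Or.inr rfl, by omega⟩
            · rintro ⟨j, hj | rfl, hlt⟩
              · exact Or.inl ⟨j, hj, hlt⟩
              · right; omega

-- ===== VERDICT (by name: the statement is the Claim_ definition above) =====
theorem sbd_heuristic_spec : Claim_equal_sbd_heuristic := by
  intro v_diff njumps msl _
  unfold Spec_sbd_heuristic sbd_heuristic sbd_heuristic_alt
  apply pvLoop_eq
  · simp
  · intro c hcm
    rw [List.mem_reverse, PySem.List.mem_sorted, PySem.List.mem_pyRange_one] at hcm
    exact hcm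
  · intro i hi
    simp
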